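-- pv_equiv track=rewrite | github.com/alex-mitrevski/explainable-robot-execution-models | robot_action_execution/action_execution_model.py | count_predicates_in_candidate_list
-- ===== SOURCE A (Python) =====
-- from typing import Tuple, Sequence, Callable
--
-- def count_predicates_in_candidate_list(predicate_names: Sequence[str],
--                                        diagnosis_candidates: Sequence[Tuple[str, str]]):
--     '''Returns the number of times the predicates in "predicate_names"
--     appear in "diagnosis_candidate".
--
--     Keyword arguments:
--     predicate_names: Sequence[str] -- list of predicate names
--     diagnosis_candidates: Sequence[Tuple[str, str]] -- list of (predicate name, predicate parameters)
--                                                        tuples containing diagnosis candidates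
--
--     '''
--     count = 0
--     for p in predicate_names:
--         for candidate in diagnosis_candidates:
--             p_name = candidate
--             if type(candidate) is tuple:
--                 p_name = candidate[0]
--
--             if p == p_name:
--                 count += 1
--     return count
-- ===== SOURCE B (Python) =====
-- def count_predicates_in_candidate_list(predicate_names, diagnosis_candidates):
--     counts = {}
--     for candidate in diagnosis_candidates:
--         p_name = candidate[0] if type(candidate) is tuple else candidate
--         counts[p_name] = counts.get(p_name, 0) + 1
--     return sum(counts.get(p, 0) for p in predicate_names)
-- ===== Notes on version B (the rewrite author's own statement) =====
-- stated objective: faster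
-- what changed: Replaces the nested scan (for each predicate, scan all candidates) with a single-pass histogram of candidate names followed by one pass of dictionary lookups over predicate_names.
import Mathlib
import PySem

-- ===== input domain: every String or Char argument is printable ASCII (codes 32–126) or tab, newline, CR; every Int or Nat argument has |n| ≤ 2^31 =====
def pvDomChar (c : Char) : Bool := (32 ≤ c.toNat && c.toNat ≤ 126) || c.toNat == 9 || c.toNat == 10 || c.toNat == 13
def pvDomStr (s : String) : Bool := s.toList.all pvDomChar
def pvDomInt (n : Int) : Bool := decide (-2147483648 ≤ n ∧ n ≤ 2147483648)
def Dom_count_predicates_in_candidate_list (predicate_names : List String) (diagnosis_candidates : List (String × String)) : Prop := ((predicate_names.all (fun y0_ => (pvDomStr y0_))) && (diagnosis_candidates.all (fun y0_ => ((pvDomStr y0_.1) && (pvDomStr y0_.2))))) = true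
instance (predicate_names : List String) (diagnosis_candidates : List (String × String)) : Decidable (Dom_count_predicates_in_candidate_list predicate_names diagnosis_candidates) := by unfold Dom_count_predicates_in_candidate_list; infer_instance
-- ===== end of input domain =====

-- ===== PORT A =====
-- B replaces A's nested scan with a one-pass histogram of candidate names plus one pass of lookups (faster).
def count_predicates_in_candidate_list (predicate_names : List String) (diagnosis_candidates : List (String × String)) : Int :=
  predicate_names.foldl (fun count p =>
    diagnosis_candidates.foldl (fun count candidate =>
      -- p_name = candidate[0] (diagnosis_candidates elements are always tuples here)
      if p == candidate.1 then count + 1 else count) count) 0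

-- ===== PORT B =====
def count_predicates_in_candidate_list_alt (predicate_names : List String) (diagnosis_candidates : List (String × String)) : Int :=
  let counts : PySem.Dict String Int :=
    diagnosis_candidates.foldl (fun d candidate => d.modify candidate.1 0 (· + 1)) PySem.Dict.empty
  predicate_names.foldl (fun s p => s + counts.getD p 0) 0

-- ===== PRECONDITION & SPEC =====
def Spec_count_predicates_in_candidate_list (predicate_names : List String) (diagnosis_candidates : List (String × String)) (out : Int) : Prop := out = count_predicates_in_candidate_list_alt predicate_names diagnosis_candidates
instance (predicate_names : List String) (diagnosis_candidates : List (String × String)) (out : Int) : Decidable (Spec_count_predicates_in_candidate_list predicate_names diagnosis_candidates out) := by unfold Spec_count_predicates_in_candidate_list; infer_instance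

-- ===== CLAIM (what is proved, stated in full; the proofs are below) =====
def Claim_equal_count_predicates_in_candidate_list : Prop := ∀ (predicate_names : List String) (diagnosis_candidates : List (String × String)), Dom_count_predicates_in_candidate_list predicate_names diagnosis_candidates → Spec_count_predicates_in_candidate_list predicate_names diagnosis_candidates (count_predicates_in_candidate_list predicate_names diagnosis_candidates)

-- ===== LEMMAS AND PROOFS =====

-- ===== VERDICT (by name: the statement is the Claim_ definition above) =====
lemma inner_count (p : String) (l : List (String × String)) (acc : Int) :
    l.foldl (fun c candidate => if p == candidate.1 then c + 1 else c) acc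
      = acc + ((l.map Prod.fst).count p : Int) := by
  induction l generalizing acc with
  | nil => simp
  | cons x xs ih =>
      simp only [List.foldl_cons, List.map_cons, List.count_cons, ih]
      by_cases h : p = x.1
      · simp [h]; ring
      · simp [h, Ne.symm h, beq_iff_eq]

lemma hist_getD_gen (p : String) (l : List (String × String)) (d : PySem.Dict String Int) :
    (l.foldl (fun d candidate => d.modify candidate.1 0 (· + 1)) d).getD p 0
      = d.getD p 0 + ((l.map Prod.fst).count p : Int) := by
  induction l generalizing d with
  | nil => simp
  | cons x xs ih =>
      simp only [List.foldl_cons, List.map_cons, List.count_cons, ih,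
        PySem.Dict.getD_modify]
      by_cases h : p = x.1
      · simp [h]; ring
      · simp [h, Ne.symm h]

lemma hist_getD (p : String) (l : List (String × String)) :
    (l.foldl (fun d candidate => d.modify candidate.1 0 (· + 1)) PySem.Dict.empty).getD p 0
      = ((l.map Prod.fst).count p : Int) := by
  rw [hist_getD_gen]
  simp [PySem.Dict.empty, PySem.Dict.getD, PySem.Dict.get?]

theorem count_predicates_in_candidate_list_spec : Claim_equal_count_predicates_in_candidate_list := by
  intro ps cs _
  show _ = _
  unfold count_predicates_in_candidate_list count_predicates_in_candidate_list_alt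
  simp only [inner_count, hist_getD]
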